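-- pv_equiv track=rewrite | github.com/EduardoDknight/nomina-iesef | scripts/fix_relink_evaluaciones.py | detectar_modalidad
-- ===== SOURCE A (Python) =====
-- PREFIJO_MODAL = {
--     'LENA':  'mixta',
--     'EEQ':   'mixta', 'EEQX': 'mixta',
--     'EECI':  'mixta',
--     'EEP':   'mixta', 'EEPER':'mixta',
--     'EEG':   'mixta',
--     'EADSE': 'virtual',
--     'MSP':   'virtual',
--     'MGDIS': 'virtual',
--     'MDIE':  'virtual',
-- }
--
-- def normalizar_grupo(g):
--     """Elimina prefijo 'EA26 ' y espacios extra."""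
--     if not g:
--         return ''
--     g = g.strip()
--     if g.upper().startswith('EA26 '):
--         g = g[5:].strip()
--     return g
--
-- def detectar_modalidad(grupo):
--     """Devuelve la modalidad correcta según el prefijo del grupo."""
--     if not grupo:
--         return None
--     norm = normalizar_grupo(grupo)
--     for prefijo, modal in sorted(PREFIJO_MODAL.items(), key=lambda x: -len(x[0])):
--         if norm.upper().startswith(prefijo):
--             return modal
--     return None
-- ===== SOURCE B (Python) =====
-- PREFIJO_MODAL = {
--     'LENA':  'mixta',
--     'EEQ':   'mixta', 'EEQX': 'mixta',
--     'EECI':  'mixta',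
--     'EEP':   'mixta', 'EEPER':'mixta',
--     'EEG':   'mixta',
--     'EADSE': 'virtual',
--     'MSP':   'virtual',
--     'MGDIS': 'virtual',
--     'MDIE':  'virtual',
-- }
--
-- def normalizar_grupo(g):
--     """Elimina prefijo 'EA26 ' y espacios extra."""
--     if not g:
--         return ''
--     g = g.strip()
--     if g.upper().startswith('EA26 '):
--         g = g[5:].strip()
--     return g
--
-- def detectar_modalidad(grupo):
--     """Devuelve la modalidad correcta según el prefijo del grupo."""
--     if not grupo:
--         return None
--     u = normalizar_grupo(grupo).upper()
--     max_len = max(len(k) for k in PREFIJO_MODAL)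
--     for L in range(min(len(u), max_len), 0, -1):
--         modal = PREFIJO_MODAL.get(u[:L])
--         if modal is not None:
--             return modal
--     return None
-- ===== Notes on version B (the rewrite author's own statement) =====
-- stated objective: idiomatic
-- what changed: B drops the sort-and-scan over the dict items and instead looks up each decreasing prefix of the normalized group directly in PREFIJO_MODAL (bounded by the longest key), using the dict as a lookup table keyed by input prefixes.
import Mathlib
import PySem

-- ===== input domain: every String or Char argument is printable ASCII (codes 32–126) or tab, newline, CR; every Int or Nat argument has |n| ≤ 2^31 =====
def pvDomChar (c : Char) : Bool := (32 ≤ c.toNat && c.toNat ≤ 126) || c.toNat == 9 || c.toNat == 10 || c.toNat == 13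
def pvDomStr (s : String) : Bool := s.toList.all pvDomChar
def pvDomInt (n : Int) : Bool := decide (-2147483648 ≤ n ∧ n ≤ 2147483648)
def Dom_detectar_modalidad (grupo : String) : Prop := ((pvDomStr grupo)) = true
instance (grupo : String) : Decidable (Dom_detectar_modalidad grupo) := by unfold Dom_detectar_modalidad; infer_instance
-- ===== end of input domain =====

-- B looks up decreasing prefixes of the input in the dict instead of sorting the dict items
-- and scanning them with startswith (objective: idiomatic; same longest-prefix result).

-- ===== PORT A =====
def PREFIJO_MODAL : PySem.Dict String String := PySem.Dict.ofList
  [("LENA","mixta"),("EEQ","mixta"),("EEQX","mixta"),("EECI","mixta"),("EEP","mixta"),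
   ("EEPER","mixta"),("EEG","mixta"),("EADSE","virtual"),("MSP","virtual"),
   ("MGDIS","virtual"),("MDIE","virtual")]

def normalizar_grupo (g : String) : String :=
  if g == "" then ""
  else
    let g1 := PySem.Str.strip g
    if PySem.Str.startswith (PySem.Str.upper g1) "EA26 " then
      PySem.Str.strip (PySem.Str.slice g1 (some 5) none)
    else g1

-- the `for prefijo, modal in sorted(PREFIJO_MODAL.items(), key=lambda x: -len(x[0]))` loop of A
def pvLoopA (norm : String) : List (String × String) → Option String
  | [] => none
  | (prefijo, modal) :: rest =>
    if PySem.Str.startswith (PySem.Str.upper norm) prefijo then some modal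
    else pvLoopA norm rest

def detectar_modalidad (grupo : String) : Option String :=
  if grupo == "" then none
  else
    let norm := normalizar_grupo grupo
    pvLoopA norm (PySem.List.sorted PREFIJO_MODAL.items (fun x => -(PySem.Str.len x.1 : Int)) false)

-- ===== PORT B =====
-- max(len(k) for k in PREFIJO_MODAL); the key list is non-empty, so getD's default is unreachable
def pvMaxLen : Int := (PySem.List.max? (PREFIJO_MODAL.keys.map (fun k => PySem.Str.len k)) (fun x => x)).getD 0

-- the `for L in range(min(len(u), max_len), 0, -1)` loop of B
def pvLoopB (u : String) : List Int → Option String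
  | [] => none
  | L :: rest =>
    match PREFIJO_MODAL.get? (PySem.Str.slice u none (some L)) with
    | some modal => some modal
    | none => pvLoopB u rest

def detectar_modalidad_alt (grupo : String) : Option String :=
  if grupo == "" then none
  else
    let u := PySem.Str.upper (normalizar_grupo grupo)
    pvLoopB u (PySem.List.pyRange (min (PySem.Str.len u) pvMaxLen) 0 (-1))

-- ===== PRECONDITION & SPEC =====
def Spec_detectar_modalidad (grupo : String) (out : Option String) : Prop := out = detectar_modalidad_alt grupo
instance (grupo : String) (out : Option String) : Decidable (Spec_detectar_modalidad grupo out) := by unfold Spec_detectar_modalidad; infer_instance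

-- ===== CLAIM (what is proved, stated in full; the proofs are below) =====
def Claim_equal_detectar_modalidad : Prop := ∀ (grupo : String), Dom_detectar_modalidad grupo → Spec_detectar_modalidad grupo (detectar_modalidad grupo)

-- ===== LEMMAS AND PROOFS =====

theorem pvStartswith_eq_decide (u p : String) :
    PySem.Str.startswith u p = decide (u.toList.take p.toList.length = p.toList) := by
  rw [PySem.Str.startswith_eq, Bool.eq_iff_iff]
  rw [PySem.Chars.startswith_iff, List.prefix_iff_eq_take, decide_eq_true_iff]
  exact eq_comm

theorem pvBeq_eq_decide (s t : String) : (s == t) = decide (t.toList = s.toList) := by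
  rw [Bool.eq_iff_iff, beq_iff_eq, decide_eq_true_iff, String.toList_inj]
  exact eq_comm

theorem pvSlice_toList (u : String) (L : Int) (h : 0 ≤ L) :
    (PySem.Str.slice u none (some L)).toList = u.toList.take L.toNat := by
  rw [PySem.Str.toList_slice, PySem.Chars.slice_eq_listSlice, PySem.List.slice_to _ h]

theorem pvSorted_eval :
    PySem.List.sorted PREFIJO_MODAL.items (fun x => -(PySem.Str.len x.1 : Int)) false =
    [("EEPER","mixta"),("EADSE","virtual"),("MGDIS","virtual"),("LENA","mixta"),("EEQX","mixta"),
     ("EECI","mixta"),("MDIE","virtual"),("EEQ","mixta"),("EEP","mixta"),("EEG","mixta"),("MSP","virtual")] := by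
  decide

theorem pvMaxLen_eval : pvMaxLen = 5 := by decide

theorem pvDict_eval : PREFIJO_MODAL = PySem.Dict.mk
  [("LENA","mixta"),("EEQ","mixta"),("EEQX","mixta"),("EECI","mixta"),("EEP","mixta"),
   ("EEPER","mixta"),("EEG","mixta"),("EADSE","virtual"),("MSP","virtual"),
   ("MGDIS","virtual"),("MDIE","virtual")] := by decide

-- proof-side view of A's loop: the `norm.upper()` of the loop body lifted to a parameter
def pvChainA (u : String) : List (String × String) → Option String
  | [] => none
  | (prefijo, modal) :: rest =>
    if PySem.Str.startswith u prefijo then some modal else pvChainA u rest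

theorem pvLoopA_eq_chain (norm : String) (l : List (String × String)) :
    pvLoopA norm l = pvChainA (PySem.Str.upper norm) l := by
  induction l with
  | nil => rfl
  | cons p rest ih => cases p; simp [pvLoopA, pvChainA, ih]

theorem pvLoopB_nil (u : String) : pvLoopB u [] = none := rfl

theorem pvLoopB_cons (u : String) (L : Int) (rest : List Int) :
    pvLoopB u (L :: rest) =
      Option.or (PREFIJO_MODAL.get? (PySem.Str.slice u none (some L))) (pvLoopB u rest) := by
  cases h : PREFIJO_MODAL.get? (PySem.Str.slice u none (some L)) <;> simp [pvLoopB, h, Option.or]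

theorem pvOr_ite (c : Prop) [Decidable c] (a b y : Option String) :
    Option.or (if c then a else b) y = if c then Option.or a y else Option.or b y := by
  split <;> rfl

theorem pvCore (norm : String) :
    pvLoopA norm (PySem.List.sorted PREFIJO_MODAL.items (fun x => -(PySem.Str.len x.1 : Int)) false) =
    pvLoopB (PySem.Str.upper norm)
      (PySem.List.pyRange (min (PySem.Str.len (PySem.Str.upper norm)) pvMaxLen) 0 (-1)) := by
  rw [pvSorted_eval, pvMaxLen_eval, pvLoopA_eq_chain]
  generalize PySem.Str.upper norm = u
  rw [PySem.Str.len_eq]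
  simp only [pvChainA, pvStartswith_eq_decide]
  rcases hcs : u.toList with _ | ⟨a, _ | ⟨b, _ | ⟨c, _ | ⟨d, _ | ⟨e, rest⟩⟩⟩⟩⟩
  · have hn : min ((([] : List Char).length : Int)) 5 = 0 := by norm_num
    rw [hn]
    have hr : PySem.List.pyRange 0 0 (-1) = ([] : List Int) := by decide
    rw [hr]
    simp [pvLoopB_nil]
  · have hn : min (([a].length : Int)) 5 = 1 := by norm_num
    rw [hn]
    have hr : PySem.List.pyRange 1 0 (-1) = [1] := by decide
    rw [hr]
    have s1 := fun (v : String) => pvSlice_toList v 1 (by norm_num)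
    simp only [pvLoopB_cons, pvLoopB_nil]
    simp only [pvDict_eval, PySem.Dict.get?_mk_cons, pvBeq_eq_decide, s1,
      pvOr_ite, Option.some_or]
    simp only [hcs]
    simp [List.take, PySem.Dict.get?]
  · have hn : min (([a, b].length : Int)) 5 = 2 := by norm_num
    rw [hn]
    have hr : PySem.List.pyRange 2 0 (-1) = [2, 1] := by decide
    rw [hr]
    have s2 := fun (v : String) => pvSlice_toList v 2 (by norm_num)
    have s1 := fun (v : String) => pvSlice_toList v 1 (by norm_num)
    simp only [pvLoopB_cons, pvLoopB_nil]
    simp only [pvDict_eval, PySem.Dict.get?_mk_cons, pvBeq_eq_decide, s2, s1,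
      pvOr_ite, Option.some_or]
    simp only [hcs]
    simp [List.take, PySem.Dict.get?]
  · have hn : min (([a, b, c].length : Int)) 5 = 3 := by norm_num
    rw [hn]
    have hr : PySem.List.pyRange 3 0 (-1) = [3, 2, 1] := by decide
    rw [hr]
    have s3 := fun (v : String) => pvSlice_toList v 3 (by norm_num)
    have s2 := fun (v : String) => pvSlice_toList v 2 (by norm_num)
    have s1 := fun (v : String) => pvSlice_toList v 1 (by norm_num)
    simp only [pvLoopB_cons, pvLoopB_nil]
    simp only [pvDict_eval, PySem.Dict.get?_mk_cons, pvBeq_eq_decide, s3, s2, s1,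
      pvOr_ite, Option.some_or]
    simp only [hcs]
    simp [List.take, PySem.Dict.get?]
  · have hn : min (([a, b, c, d].length : Int)) 5 = 4 := by norm_num
    rw [hn]
    have hr : PySem.List.pyRange 4 0 (-1) = [4, 3, 2, 1] := by decide
    rw [hr]
    have s4 := fun (v : String) => pvSlice_toList v 4 (by norm_num)
    have s3 := fun (v : String) => pvSlice_toList v 3 (by norm_num)
    have s2 := fun (v : String) => pvSlice_toList v 2 (by norm_num)
    have s1 := fun (v : String) => pvSlice_toList v 1 (by norm_num)
    simp only [pvLoopB_cons, pvLoopB_nil]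
    simp only [pvDict_eval, PySem.Dict.get?_mk_cons, pvBeq_eq_decide, s4, s3, s2, s1,
      pvOr_ite, Option.some_or]
    simp only [hcs]
    simp [List.take, PySem.Dict.get?, Option.none_or]
  · have h5 : min ((((a::b::c::d::e::rest).length : Int))) 5 = 5 := by simp; omega
    rw [h5]
    have hr : PySem.List.pyRange 5 0 (-1) = [5,4,3,2,1] := by decide
    rw [hr]
    simp only [pvLoopB_cons, pvLoopB_nil]
    have s5 := fun (v : String) => pvSlice_toList v 5 (by norm_num)
    have s4 := fun (v : String) => pvSlice_toList v 4 (by norm_num)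
    have s3 := fun (v : String) => pvSlice_toList v 3 (by norm_num)
    have s2 := fun (v : String) => pvSlice_toList v 2 (by norm_num)
    have s1 := fun (v : String) => pvSlice_toList v 1 (by norm_num)
    simp only [pvDict_eval, PySem.Dict.get?_mk_cons, pvBeq_eq_decide, s5, s4, s3, s2, s1,
      pvOr_ite, Option.some_or]
    simp only [hcs]
    simp [List.take, PySem.Dict.get?, Option.none_or]

-- ===== VERDICT (by name: the statement is the Claim_ definition above) =====
theorem detectar_modalidad_spec : Claim_equal_detectar_modalidad := by
  intro grupo _
  unfold Spec_detectar_modalidad detectar_modalidad detectar_modalidad_alt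
  by_cases h : grupo == ""
  · simp [h]
  · simp only [h, if_false, Bool.false_eq_true]
    exact pvCore (normalizar_grupo grupo)
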